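-- pv_equiv track=rewrite | github.com/Sampath808/Root-Cause-Analyser | agents/critique_agent.py | _parse_suggestions_response
-- ===== SOURCE A (Python) =====
-- from typing import Dict, Any, List
--
-- def _parse_suggestions_response(
--     suggestions_text: str
-- ) -> List[Dict[str, Any]]:
--     """Parse improvement suggestions."""
--     suggestions = []
--
--     # Simple parsing - could be enhanced
--     lines = suggestions_text.split("\n")
--     current_suggestion = {}
--
--     for line in lines:
--         line = line.strip()
--         if line.startswith("SUGGESTION"):
--             if current_suggestion:
--                 suggestions.append(current_suggestion)
--             current_suggestion = {}
--         elif line.startswith("Priority:"):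
--             current_suggestion["priority"] = line.split(":", 1)[1].strip()
--         elif line.startswith("Action:"):
--             current_suggestion["action"] = line.split(":", 1)[1].strip()
--         elif line.startswith("Reason:"):
--             current_suggestion["reason"] = line.split(":", 1)[1].strip()
--
--     if current_suggestion:
--         suggestions.append(current_suggestion)
--
--     return suggestions
-- ===== SOURCE B (Python) =====
-- def _parse_suggestions_response(suggestions_text):
--     """Parse improvement suggestions (group-then-parse)."""
--     lines = [ln.strip() for ln in suggestions_text.split("\n")]
--     # partition into segments: one before the first SUGGESTION marker, one per marker
--     segments = [[]]
--     for ln in lines: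
--         if ln.startswith("SUGGESTION"):
--             segments.append([])
--         else:
--             segments[-1].append(ln)
--
--     def parse(seg):
--         d = {}
--         for ln in seg:
--             for prefix, key in (("Priority:", "priority"),
--                                 ("Action:", "action"),
--                                 ("Reason:", "reason")):
--                 if ln.startswith(prefix):
--                     d[key] = ln.split(":", 1)[1].strip()
--                     break
--         return d
--
--     return [d for d in map(parse, segments) if d]
-- ===== Notes on version B (the rewrite author's own statement) =====
-- stated objective: alternative
-- what changed: Replaces A's single-pass state machine (a dict accumulator reset at each SUGGESTION line) by a group-then-parse decomposition: first partition the stripped lines into segments at SUGGESTION markers, then parse each segment independently into a dict and keep the non-empty ones.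
import Mathlib
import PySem

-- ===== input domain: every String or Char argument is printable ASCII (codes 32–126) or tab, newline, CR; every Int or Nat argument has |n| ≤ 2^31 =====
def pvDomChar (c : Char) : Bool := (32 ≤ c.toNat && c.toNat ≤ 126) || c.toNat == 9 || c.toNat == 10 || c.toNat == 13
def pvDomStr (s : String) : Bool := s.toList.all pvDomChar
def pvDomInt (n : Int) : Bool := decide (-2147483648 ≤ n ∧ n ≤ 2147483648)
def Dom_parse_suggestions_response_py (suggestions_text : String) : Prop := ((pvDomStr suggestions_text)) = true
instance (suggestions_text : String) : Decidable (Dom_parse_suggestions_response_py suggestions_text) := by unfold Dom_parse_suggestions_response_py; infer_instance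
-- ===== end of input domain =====

-- B replaces A's inline accumulator-reset state machine by a group-then-parse decomposition
-- (split the stripped lines into segments at SUGGESTION markers, then parse each segment);
-- objective: alternative decomposition, same cost.


-- line.split(":", 1)[1].strip()  (exact when ":" occurs in line, which holds wherever it is called)
def pvField (line : String) : String :=
  PySem.Str.strip ((((PySem.Str.splitMax? line ":" 1).getD [])).getD 1 "")

-- ===== PORT A =====
-- A's loop: state (suggestions, current_suggestion), reset on SUGGESTION lines, flush at the end
def pvLoopA : List String → List (List (String × String)) → PySem.Dict String String →
    List (List (String × String))
  | [], suggestions, cur =>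
      if cur.items ≠ [] then suggestions ++ [cur.items] else suggestions
  | l :: ls, suggestions, cur =>
      let line := PySem.Str.strip l
      if PySem.Str.startswith line "SUGGESTION" then
        pvLoopA ls (if cur.items ≠ [] then suggestions ++ [cur.items] else suggestions)
          PySem.Dict.empty
      else if PySem.Str.startswith line "Priority:" then
        pvLoopA ls suggestions (cur.insert "priority" (pvField line))
      else if PySem.Str.startswith line "Action:" then
        pvLoopA ls suggestions (cur.insert "action" (pvField line))
      else if PySem.Str.startswith line "Reason:" then
        pvLoopA ls suggestions (cur.insert "reason" (pvField line))
      else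
        pvLoopA ls suggestions cur

def parse_suggestions_response_py (suggestions_text : String) : List (List (String × String)) :=
  pvLoopA ((PySem.Str.split? suggestions_text "\n").getD []) [] PySem.Dict.empty

-- ===== PORT B =====
-- B: split the stripped lines into segments at SUGGESTION markers (grouping pass) …
def pvSegments : List String → List (List String) → List String → List (List String)
  | [], done, cur => done ++ [cur]
  | l :: ls, done, cur =>
      if PySem.Str.startswith l "SUGGESTION" then pvSegments ls (done ++ [cur]) []
      else pvSegments ls done (cur ++ [l])

-- … then parse each segment into a dict by the Priority/Action/Reason prefixes
def pvParseSeg (seg : List String) : PySem.Dict String String :=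
  seg.foldl (fun d ln =>
    if PySem.Str.startswith ln "Priority:" then d.insert "priority" (pvField ln)
    else if PySem.Str.startswith ln "Action:" then d.insert "action" (pvField ln)
    else if PySem.Str.startswith ln "Reason:" then d.insert "reason" (pvField ln)
    else d) PySem.Dict.empty

def parse_suggestions_response_py_alt (suggestions_text : String) : List (List (String × String)) :=
  let lines := ((PySem.Str.split? suggestions_text "\n").getD []).map PySem.Str.strip
  ((pvSegments lines [] []).map (fun seg => (pvParseSeg seg).items)).filter (· ≠ [])

-- ===== PRECONDITION & SPEC =====
def Spec_parse_suggestions_response_py (suggestions_text : String) (out : List (List (String × String))) : Prop := out = parse_suggestions_response_py_alt suggestions_text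
instance (suggestions_text : String) (out : List (List (String × String))) : Decidable (Spec_parse_suggestions_response_py suggestions_text out) := by unfold Spec_parse_suggestions_response_py; infer_instance

-- ===== CLAIM (what is proved, stated in full; the proofs are below) =====
def Claim_equal_parse_suggestions_response_py : Prop := ∀ (suggestions_text : String), Dom_parse_suggestions_response_py suggestions_text → Spec_parse_suggestions_response_py suggestions_text (parse_suggestions_response_py suggestions_text)

-- ===== LEMMAS AND PROOFS =====

-- pulling the 'done' accumulator out of the grouping loop
theorem pvSegments_done (ls : List String) (done : List (List String)) (cur : List String) :
    pvSegments ls done cur = done ++ pvSegments ls [] cur := by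
  induction ls generalizing done cur with
  | nil => simp [pvSegments]
  | cons l ls ih =>
      simp only [pvSegments]
      split_ifs with h
      · rw [ih (done ++ [cur]) [], ih ([] ++ [cur]) []]; simp
      · exact ih done (cur ++ [l])

-- extending a segment by one line = one update step of its dict
theorem pvParseSeg_snoc (seg : List String) (l : String) :
    pvParseSeg (seg ++ [l]) =
      (if PySem.Str.startswith l "Priority:" then (pvParseSeg seg).insert "priority" (pvField l)
       else if PySem.Str.startswith l "Action:" then (pvParseSeg seg).insert "action" (pvField l)
       else if PySem.Str.startswith l "Reason:" then (pvParseSeg seg).insert "reason" (pvField l)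
       else pvParseSeg seg) := by
  simp only [pvParseSeg, List.foldl_append, List.foldl_cons, List.foldl_nil]

-- the key invariant: A's state machine equals B's group-then-parse on the remaining lines
theorem pvLoopA_eq (ls : List String) (acc : List (List (String × String))) (cur : List String) :
    pvLoopA ls acc (pvParseSeg cur) =
      acc ++ ((pvSegments (ls.map PySem.Str.strip) [] cur).map
        (fun seg => (pvParseSeg seg).items)).filter (· ≠ []) := by
  induction ls generalizing acc cur with
  | nil =>
      simp only [pvLoopA, List.map_nil, pvSegments]
      split_ifs with h <;> simp_all
  | cons l ls ih =>
      simp only [pvLoopA, List.map_cons, pvSegments]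
      by_cases hM : PySem.Str.startswith (PySem.Str.strip l) "SUGGESTION"
      · simp only [hM, if_true, List.nil_append]
        rw [pvSegments_done (ls.map PySem.Str.strip) [cur] []]
        have : pvParseSeg ([] : List String) = PySem.Dict.empty := rfl
        rw [← this, ih]
        simp only [List.map_append, List.filter_append, List.map_cons, List.map_nil,
          List.filter_cons, List.filter_nil]
        split_ifs with h1 h2 h2 <;> simp_all
      · simp only [if_neg hM]
        have hstep : ∀ d : PySem.Dict String String, d = pvParseSeg cur →
            (if PySem.Str.startswith (PySem.Str.strip l) "Priority:" then
               pvLoopA ls acc (d.insert "priority" (pvField (PySem.Str.strip l)))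
             else if PySem.Str.startswith (PySem.Str.strip l) "Action:" then
               pvLoopA ls acc (d.insert "action" (pvField (PySem.Str.strip l)))
             else if PySem.Str.startswith (PySem.Str.strip l) "Reason:" then
               pvLoopA ls acc (d.insert "reason" (pvField (PySem.Str.strip l)))
             else pvLoopA ls acc d)
            = pvLoopA ls acc (pvParseSeg (cur ++ [PySem.Str.strip l])) := by
          intro d hd
          rw [pvParseSeg_snoc, hd]
          split_ifs <;> rfl
        rw [hstep (pvParseSeg cur) rfl, ih]

-- ===== VERDICT (by name: the statement is the Claim_ definition above) =====
theorem parse_suggestions_response_py_spec : Claim_equal_parse_suggestions_response_py := by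
  intro s _
  show parse_suggestions_response_py s = parse_suggestions_response_py_alt s
  have : PySem.Dict.empty = pvParseSeg ([] : List String) := rfl
  simp only [parse_suggestions_response_py, parse_suggestions_response_py_alt, this,
    pvLoopA_eq, List.nil_append]
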